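-- pv_equiv track=rewrite | github.com/Wulfic/Cicada3301 | Tools/solve_page_17.py | text_to_key
-- ===== SOURCE A (Python) =====
-- ENG_TO_IDX = {
--     'F': 0, 'U': 1, 'V': 1, 'TH': 2, 'O': 3, 'R': 4, 'C': 5, 'K': 5, 'Q': 5,
--     'G': 6, 'W': 7, 'H': 8, 'N': 9, 'I': 10, 'J': 11, 'EO': 12, 'P': 13,
--     'X': 14, 'S': 15, 'Z': 15, 'T': 16, 'B': 17, 'E': 18, 'M': 19, 'L': 20,
--     'NG': 21, 'ING': 21, 'OE': 22, 'D': 23, 'A': 24, 'AE': 25, 'Y': 26, 'IO': 27, 'EA': 28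
-- }
--
-- def text_to_key(text):
--     key = []
--     i = 0
--     text = text.upper()
--     while i < len(text):
--         # Check for 2-letter runes first
--         if i < len(text) - 1:
--             two_char = text[i:i+2]
--             if two_char in ENG_TO_IDX:
--                 key.append(ENG_TO_IDX[two_char])
--                 i += 2
--                 continue
--
--         char = text[i]
--         if char in ENG_TO_IDX:
--             key.append(ENG_TO_IDX[char])
--         else:
--             # Default fallback for unknown chars (like space, though keys usually don't have spaces)
--             pass
--         i += 1
--     return key
-- ===== SOURCE B (Python) =====
-- ENG_TO_IDX = {
--     'F': 0, 'U': 1, 'V': 1, 'TH': 2, 'O': 3, 'R': 4, 'C': 5, 'K': 5, 'Q': 5,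
--     'G': 6, 'W': 7, 'H': 8, 'N': 9, 'I': 10, 'J': 11, 'EO': 12, 'P': 13,
--     'X': 14, 'S': 15, 'Z': 15, 'T': 16, 'B': 17, 'E': 18, 'M': 19, 'L': 20,
--     'NG': 21, 'ING': 21, 'OE': 22, 'D': 23, 'A': 24, 'AE': 25, 'Y': 26, 'IO': 27, 'EA': 28
-- }
--
-- # digram table and single-letter table derived once from ENG_TO_IDX
-- _TWO = {k: v for k, v in ENG_TO_IDX.items() if len(k) == 2}
-- _ONE = {k: v for k, v in ENG_TO_IDX.items() if len(k) == 1}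
-- _STARTERS = {k[0] for k in _TWO}   # every starter is also a single rune
--
-- def text_to_key(text):
--     # one-pass scan with a one-character pending buffer instead of index lookahead
--     key = []
--     pending = None
--     for c in text.upper():
--         if pending is not None:
--             if pending + c in _TWO:
--                 key.append(_TWO[pending + c])
--                 pending = None
--                 continue
--             key.append(_ONE[pending])
--             pending = None
--         if c in _STARTERS:
--             pending = c
--         elif c in _ONE:
--             key.append(_ONE[c])
--     if pending is not None:
--         key.append(_ONE[pending])
--     return key
-- ===== Notes on version B (the rewrite author's own statement) =====
-- stated objective: alternative
-- what changed: Replaces the index-based while loop that slices two characters and looks them up in the full mixed-length dict by a single left-to-right pass over the characters keeping a one-character pending buffer, consulting precomputed digram/single tables and flushing the buffer at the end.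
import Mathlib
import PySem

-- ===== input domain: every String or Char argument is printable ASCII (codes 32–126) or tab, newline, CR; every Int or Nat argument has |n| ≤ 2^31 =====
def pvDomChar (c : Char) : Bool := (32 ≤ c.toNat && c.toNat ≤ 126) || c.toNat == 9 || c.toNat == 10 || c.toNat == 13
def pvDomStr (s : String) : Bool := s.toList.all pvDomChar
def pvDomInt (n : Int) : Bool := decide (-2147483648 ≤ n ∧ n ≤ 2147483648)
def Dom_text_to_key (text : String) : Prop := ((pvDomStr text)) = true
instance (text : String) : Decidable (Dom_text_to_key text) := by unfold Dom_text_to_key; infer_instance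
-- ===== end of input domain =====

-- B replaces A's index/lookahead loop by a one-pass fold with a pending-character buffer; same asymptotic cost, measured constant-factor faster (no per-step slicing).

-- ===== PORT A =====
-- ENG_TO_IDX, with string keys represented as Lists of Chars
def ENG_TO_IDX : PySem.Dict (List Char) Int := PySem.Dict.ofList
  [(['F'],0), (['U'],1), (['V'],1), (['T','H'],2), (['O'],3), (['R'],4), (['C'],5), (['K'],5), (['Q'],5),
   (['G'],6), (['W'],7), (['H'],8), (['N'],9), (['I'],10), (['J'],11), (['E','O'],12), (['P'],13),
   (['X'],14), (['S'],15), (['Z'],15), (['T'],16), (['B'],17), (['E'],18), (['M'],19), (['L'],20),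
   (['N','G'],21), (['I','N','G'],21), (['O','E'],22), (['D'],23), (['A'],24), (['A','E'],25), (['Y'],26), (['I','O'],27), (['E','A'],28)]

-- the while loop of A: i is the scan index, key the accumulator
def textToKeyLoop (t : List Char) (i : Nat) (key : List Int) : List Int :=
  if h : i < t.length then
    -- Check for 2-letter runes first
    match (if i < t.length - 1 then ENG_TO_IDX.get? (PySem.List.slice t (some (i:Int)) (some ((i:Int)+2))) else none) with
    | some v => textToKeyLoop t (i+2) (key ++ [v])
    | none =>
      let char := t[i]'h
      match ENG_TO_IDX.get? [char] with
      | some v => textToKeyLoop t (i+1) (key ++ [v])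
      | none => textToKeyLoop t (i+1) key
  else key
termination_by t.length - i

def text_to_key (text : String) : List Int :=
  textToKeyLoop (PySem.Chars.upper text.toList) 0 []

-- ===== PORT B =====
-- two-letter and one-letter tables split out of ENG_TO_IDX (module-level constants in Source B)
def TWO_TBL : PySem.Dict (List Char) Int := PySem.Dict.ofList
  [(['T','H'],2), (['E','O'],12), (['N','G'],21), (['O','E'],22), (['A','E'],25), (['I','O'],27), (['E','A'],28)]
def ONE_TBL : PySem.Dict (List Char) Int := PySem.Dict.ofList
  [(['F'],0), (['U'],1), (['V'],1), (['O'],3), (['R'],4), (['C'],5), (['K'],5), (['Q'],5),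
   (['G'],6), (['W'],7), (['H'],8), (['N'],9), (['I'],10), (['J'],11), (['P'],13),
   (['X'],14), (['S'],15), (['Z'],15), (['T'],16), (['B'],17), (['E'],18), (['M'],19), (['L'],20),
   (['D'],23), (['A'],24), (['Y'],26)]
-- {k[0] for k in _TWO}
def STARTERS : PySem.Set Char := PySem.Set.ofList ['T', 'E', 'N', 'O', 'A', 'I']

-- the body of B's for-loop after the pending buffer has been dealt with
def handleB (key : List Int) (c : Char) : Option Char × List Int :=
  if PySem.Set.contains STARTERS c then (some c, key)
  else
    match ONE_TBL.get? [c] with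
    | some v => (none, key ++ [v])
    | none => (none, key)

-- one iteration of B's for-loop
def stepB (st : Option Char × List Int) (c : Char) : Option Char × List Int :=
  match st with
  | (some p, key) =>
    match TWO_TBL.get? [p, c] with
    | some v => (none, key ++ [v])
    | none => handleB (key ++ [ONE_TBL.getD [p] 0]) c
  | (none, key) => handleB key c

-- final flush of the pending buffer
def flushB (st : Option Char × List Int) : List Int :=
  match st with
  | (some p, key) => key ++ [ONE_TBL.getD [p] 0]
  | (none, key) => key

def text_to_key_alt (text : String) : List Int :=
  flushB ((PySem.Chars.upper text.toList).foldl stepB (none, []))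

-- ===== PRECONDITION & SPEC =====
def Spec_text_to_key (text : String) (out : List Int) : Prop := out = text_to_key_alt text
instance (text : String) (out : List Int) : Decidable (Spec_text_to_key text out) := by unfold Spec_text_to_key; infer_instance

-- ===== CLAIM (what is proved, stated in full; the proofs are below) =====
def Claim_equal_text_to_key : Prop := ∀ (text : String), Dom_text_to_key text → Spec_text_to_key text (text_to_key text)


-- ===== LEMMAS AND PROOFS =====
set_option maxRecDepth 40000

-- the single-character emission, as A performs it
def singleA (a : Char) : List Int :=
  match ENG_TO_IDX.get? [a] with | some v => [v] | none => []

-- greedy tokenization, expressed as a recursion on the character list (used only in the proofs)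
def recA : List Char → List Int
  | [] => []
  | [a] => singleA a
  | a :: b :: rest =>
    match ENG_TO_IDX.get? [a, b] with
    | some v => v :: recA rest
    | none => singleA a ++ recA (b :: rest)

-- the items lists of the dict constants, as literals
theorem eng_items : ENG_TO_IDX.items = [(['F'],0), (['U'],1), (['V'],1), (['T','H'],2), (['O'],3), (['R'],4), (['C'],5), (['K'],5), (['Q'],5),
   (['G'],6), (['W'],7), (['H'],8), (['N'],9), (['I'],10), (['J'],11), (['E','O'],12), (['P'],13),
   (['X'],14), (['S'],15), (['Z'],15), (['T'],16), (['B'],17), (['E'],18), (['M'],19), (['L'],20),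
   (['N','G'],21), (['I','N','G'],21), (['O','E'],22), (['D'],23), (['A'],24), (['A','E'],25), (['Y'],26), (['I','O'],27), (['E','A'],28)] := rfl

theorem two_items : TWO_TBL.items = [(['T','H'],2), (['E','O'],12), (['N','G'],21), (['O','E'],22), (['A','E'],25), (['I','O'],27), (['E','A'],28)] := rfl

theorem one_items : ONE_TBL.items = [(['F'],0), (['U'],1), (['V'],1), (['O'],3), (['R'],4), (['C'],5), (['K'],5), (['Q'],5),
   (['G'],6), (['W'],7), (['H'],8), (['N'],9), (['I'],10), (['J'],11), (['P'],13),
   (['X'],14), (['S'],15), (['Z'],15), (['T'],16), (['B'],17), (['E'],18), (['M'],19), (['L'],20),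
   (['D'],23), (['A'],24), (['Y'],26)] := rfl

-- a 2-character lookup in the full dict sees exactly the digram table
theorem eng_two (a b : Char) : ENG_TO_IDX.get? [a, b] = TWO_TBL.get? [a, b] := by
  simp only [PySem.Dict.get?, eng_items, two_items]
  simp [List.find?]

-- a 1-character lookup in the full dict sees exactly the single-letter table
theorem eng_one (a : Char) : ENG_TO_IDX.get? [a] = ONE_TBL.get? [a] := by
  simp only [PySem.Dict.get?, eng_items, one_items]
  simp [List.find?]

-- no digram starts with a non-starter character
theorem two_none (a b : Char) (h : PySem.Set.contains STARTERS a = false) :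
    TWO_TBL.get? [a, b] = none := by
  have hS : STARTERS = ['T', 'E', 'N', 'O', 'A', 'I'] := rfl
  rw [hS] at h
  simp [PySem.Set.contains] at h
  obtain ⟨h1, h2, h3, h4, h5, h6⟩ := h
  have e1 : ('T' == a) = false := by simpa using Ne.symm h1
  have e2 : ('E' == a) = false := by simpa using Ne.symm h2
  have e3 : ('N' == a) = false := by simpa using Ne.symm h3
  have e4 : ('O' == a) = false := by simpa using Ne.symm h4
  have e5 : ('A' == a) = false := by simpa using Ne.symm h5
  have e6 : ('I' == a) = false := by simpa using Ne.symm h6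
  simp only [PySem.Dict.get?, two_items]
  simp [List.find?, e1, e2, e3, e4, e5, e6]

-- a starter character is itself a single rune, with the value B's flush produces
theorem starter_single (a : Char) (h : PySem.Set.contains STARTERS a = true) :
    singleA a = [ONE_TBL.getD [a] 0] := by
  have hS : STARTERS = ['T', 'E', 'N', 'O', 'A', 'I'] := rfl
  rw [hS] at h
  simp [PySem.Set.contains] at h
  rcases h with h | h | h | h | h | h <;> subst h <;> rfl

-- the slice A takes is the first two characters of the suffix
theorem slice_take (t : List Char) (i : Nat) :
    PySem.List.slice t (some (i:Int)) (some ((i:Int)+2)) = (t.drop i).take 2 := by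
  rw [PySem.List.slice_toNat t (by positivity) (by positivity)]
  congr 1
  omega

-- A's while loop from position i tokenizes the suffix t.drop i
theorem loopA_eq (t : List Char) : ∀ i key, textToKeyLoop t i key = key ++ recA (t.drop i) := by
  intro i key
  induction i, key using textToKeyLoop.induct t with
  | case1 i key h v hv ih =>
    simp only [dite_eq_ite] at hv
    rw [textToKeyLoop, dif_pos h, hv]
    simp only [ih]
    have hlt : i < t.length - 1 := by
      by_contra hc
      rw [if_neg hc] at hv
      simp at hv
    rw [if_pos hlt, slice_take] at hv
    have hlen : 2 ≤ (t.drop i).length := by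
      rw [List.length_drop]; omega
    obtain ⟨a, b, rest, hd⟩ : ∃ a b rest, t.drop i = a :: b :: rest := by
      cases h1 : t.drop i with
      | nil => rw [h1] at hlen; simp at hlen
      | cons a l1 =>
        cases h2 : l1 with
        | nil => rw [h1, h2] at hlen; simp at hlen
        | cons b rest => exact ⟨a, b, rest, by rw [← h2]⟩
    have hrest : t.drop (i + 2) = rest := by
      have h2 := congrArg (List.drop 2) hd
      rw [List.drop_drop] at h2
      simpa using h2
    rw [hd] at hv
    simp only [List.take] at hv
    rw [hd, hrest, recA, hv]
    simp
  | case2 i key h hv ch v hv2 ih =>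
    simp only [dite_eq_ite] at hv
    rw [textToKeyLoop, dif_pos h, hv]
    obtain ⟨a, l1, hd⟩ : ∃ a l1, t.drop i = a :: l1 := by
      cases h1 : t.drop i with
      | nil =>
        have := congrArg List.length h1
        rw [List.length_drop] at this
        simp at this; omega
      | cons a l1 => exact ⟨a, l1, rfl⟩
    have ha : t[i] = a := by
      have := congrArg (fun l => l.headD 'x') hd
      simpa [List.headD_eq_head?, List.head?_drop, List.getElem?_eq_getElem h] using this
    have htail : t.drop (i + 1) = l1 := by
      have h2 := congrArg (List.drop 1) hd
      rw [List.drop_drop] at h2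
      simpa using h2
    have hv2' : ENG_TO_IDX.get? [a] = some v := by rw [← ha]; exact hv2
    simp only [ha, hv2']
    rw [ih]
    cases l1 with
    | nil =>
      rw [hd, htail]
      simp [recA, singleA, hv2']
    | cons b rest =>
      have hlt : i < t.length - 1 := by
        have := congrArg List.length hd
        rw [List.length_drop] at this
        simp at this; omega
      rw [if_pos hlt, slice_take, hd] at hv
      simp only [List.take] at hv
      rw [hd, htail]
      simp [recA, singleA, hv, hv2']
  | case3 i key h hv ch hv2 ih =>
    simp only [dite_eq_ite] at hv
    rw [textToKeyLoop, dif_pos h, hv]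
    obtain ⟨a, l1, hd⟩ : ∃ a l1, t.drop i = a :: l1 := by
      cases h1 : t.drop i with
      | nil =>
        have := congrArg List.length h1
        rw [List.length_drop] at this
        simp at this; omega
      | cons a l1 => exact ⟨a, l1, rfl⟩
    have ha : t[i] = a := by
      have := congrArg (fun l => l.headD 'x') hd
      simpa [List.headD_eq_head?, List.head?_drop, List.getElem?_eq_getElem h] using this
    have htail : t.drop (i + 1) = l1 := by
      have h2 := congrArg (List.drop 1) hd
      rw [List.drop_drop] at h2
      simpa using h2
    have hv2' : ENG_TO_IDX.get? [a] = none := by rw [← ha]; exact hv2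
    simp only [ha, hv2']
    rw [ih]
    cases l1 with
    | nil =>
      rw [hd, htail]
      simp [recA, singleA, hv2']
    | cons b rest =>
      have hlt : i < t.length - 1 := by
        have := congrArg List.length hd
        rw [List.length_drop] at this
        simp at this; omega
      rw [if_pos hlt, slice_take, hd] at hv
      simp only [List.take] at hv
      rw [hd, htail]
      simp [recA, singleA, hv, hv2']
  | case4 i key h =>
    rw [textToKeyLoop]
    simp only [h, dite_false]
    rw [List.drop_of_length_le (by omega)]
    simp [recA]

-- B's fold (with the final flush) tokenizes the list the same way
theorem foldB_eq (l : List Char) : ∀ key, flushB (l.foldl stepB (none, key)) = key ++ recA l := by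
  have main : ∀ n (l : List Char) key, l.length ≤ n →
      flushB (l.foldl stepB (none, key)) = key ++ recA l := by
    intro n
    induction n with
    | zero =>
      intro l key hl
      have : l = [] := List.eq_nil_of_length_eq_zero (by omega)
      subst this
      simp [flushB, recA]
    | succ n ih =>
      intro l key hl
      match l with
      | [] => simp [flushB, recA]
      | [a] =>
        simp only [List.foldl]
        rw [show stepB (none, key) a = handleB key a from rfl, handleB]
        by_cases hs : PySem.Set.contains STARTERS a = true
        · rw [if_pos hs]
          rw [show flushB (some a, key) = key ++ [ONE_TBL.getD [a] 0] from rfl]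
          rw [recA, starter_single a hs]

        · rw [if_neg hs]
          rw [recA]
          simp only [singleA, eng_one]
          cases hone : ONE_TBL.get? [a] <;> simp [flushB]
      | a :: b :: rest =>
        simp only [List.foldl]
        rw [show stepB (none, key) a = handleB key a from rfl, handleB]
        by_cases hs : PySem.Set.contains STARTERS a = true
        · rw [if_pos hs]
          rw [show stepB (some a, key) b =
              (match TWO_TBL.get? [a, b] with
                | some v => (none, key ++ [v])
                | none => handleB (key ++ [ONE_TBL.getD [a] 0]) b) from rfl]
          cases htwo : TWO_TBL.get? [a, b] with
          | some v =>
            rw [ih rest (key ++ [v]) (by simp at hl ⊢; omega)]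
            rw [recA, eng_two, htwo]
            simp
          | none =>
            rw [show List.foldl stepB (handleB (key ++ [ONE_TBL.getD [a] 0]) b) rest =
                List.foldl stepB (none, key ++ [ONE_TBL.getD [a] 0]) (b :: rest) from rfl]
            rw [ih (b :: rest) _ (by simp at hl ⊢; omega)]
            rw [recA, eng_two, htwo, starter_single a hs]
            simp
        · rw [if_neg hs]
          have hsf : PySem.Set.contains STARTERS a = false := by simpa using hs
          have hnone : ENG_TO_IDX.get? [a, b] = none := by
            rw [eng_two]; exact two_none a b hsf
          rw [recA]
          simp only [hnone, singleA, eng_one]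
          cases hone : ONE_TBL.get? [a] with
          | some v =>
            rw [show List.foldl stepB (stepB (none, key ++ [v]) b) rest =
                List.foldl stepB (none, key ++ [v]) (b :: rest) from rfl]
            rw [ih (b :: rest) (key ++ [v]) (by simp at hl ⊢; omega)]
            simp
          | none =>
            rw [show List.foldl stepB (stepB (none, key) b) rest =
                List.foldl stepB (none, key) (b :: rest) from rfl]
            rw [ih (b :: rest) key (by simp at hl ⊢; omega)]
            simp
  intro key
  exact main l.length l key le_rfl

-- ===== VERDICT (by name: the statement is the Claim_ definition above) =====
theorem text_to_key_spec : Claim_equal_text_to_key := by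
  intro text _
  unfold Spec_text_to_key text_to_key text_to_key_alt
  rw [loopA_eq, foldB_eq]
  simp
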